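-- pv_equiv track=rewrite | github.com/AuslanderLab/Evol-structural-virus | src/model_regions.py | filter_valid_proteins
-- ===== SOURCE A (Python) =====
-- AMINO_ACIDS = 'IVLMAGPFWYCTSQNKRHED-' ##sorted by functional groups and polarity
--
-- def filter_valid_proteins(sequences):
--     """
--     Filters a list of protein sequences, keeping only those composed of valid amino acids.
--
--     Parameters
--     ----------
--     sequences : list of str
--         List of protein sequences (strings of amino acid letters).
--
--     Returns
--     -------
--     list of str
--         List containing only sequences that have valid amino acid letters.
--         Valid amino acids:IVLMAGPFWYCTSQNKRHED.
--     """
--     valid_aas = set(AMINO_ACIDS)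
--     filtered = []
--     for seq in sequences:
--         seq_set = set(seq.upper())
--         if seq_set.issubset(valid_aas):
--             filtered.append(seq)
--     return filtered
-- ===== SOURCE B (Python) =====
-- AMINO_ACIDS = 'IVLMAGPFWYCTSQNKRHED-' ##sorted by functional groups and polarity
--
-- def filter_valid_proteins(sequences):
--     # A sequence is valid iff stripping every valid amino-acid letter from both
--     # ends of its uppercased form leaves nothing: no per-sequence set is built.
--     return [seq for seq in sequences if not seq.upper().strip(AMINO_ACIDS)]
-- ===== Notes on version B (the rewrite author's own statement) =====
-- stated objective: idiomatic
-- what changed: Replaces the explicit loop that builds a set per sequence and tests issubset with a single list comprehension whose validity test is str.strip(AMINO_ACIDS) leaving the empty string (a string is all-valid iff stripping the valid alphabet from both ends empties it); no set is constructed.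
import Mathlib
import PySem

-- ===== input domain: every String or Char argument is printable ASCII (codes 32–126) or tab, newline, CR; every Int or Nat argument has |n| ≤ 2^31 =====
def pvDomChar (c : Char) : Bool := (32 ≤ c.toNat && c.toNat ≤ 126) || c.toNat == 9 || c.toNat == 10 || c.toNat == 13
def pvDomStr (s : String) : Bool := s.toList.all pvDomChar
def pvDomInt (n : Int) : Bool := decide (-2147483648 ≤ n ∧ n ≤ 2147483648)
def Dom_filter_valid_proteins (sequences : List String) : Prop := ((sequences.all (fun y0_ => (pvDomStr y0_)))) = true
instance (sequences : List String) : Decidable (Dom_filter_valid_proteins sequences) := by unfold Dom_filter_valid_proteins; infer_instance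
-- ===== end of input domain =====

-- ===== PORT A =====
def AMINO_ACIDS : String := "IVLMAGPFWYCTSQNKRHED-"

def filter_valid_proteins (sequences : List String) : List String :=
  let valid_aas : PySem.Set Char := PySem.Set.ofList AMINO_ACIDS.toList
  sequences.foldl (fun filtered seq =>
    let seq_set : PySem.Set Char := PySem.Set.ofList (PySem.Str.upper seq).toList
    if PySem.Set.issubset seq_set valid_aas then filtered ++ [seq] else filtered) []

-- ===== PORT B =====
-- B keeps seq iff `not seq.upper().strip(AMINO_ACIDS)` (the stripped string is empty).
def filter_valid_proteins_alt (sequences : List String) : List String :=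
  sequences.filter (fun seq =>
    PySem.Str.len (PySem.Str.stripChars (PySem.Str.upper seq) AMINO_ACIDS) == 0)

-- ===== PRECONDITION & SPEC =====
def Spec_filter_valid_proteins (sequences : List String) (out : List String) : Prop := out = filter_valid_proteins_alt sequences
instance (sequences : List String) (out : List String) : Decidable (Spec_filter_valid_proteins sequences out) := by unfold Spec_filter_valid_proteins; infer_instance

-- ===== CLAIM (what is proved, stated in full; the proofs are below) =====
def Claim_equal_filter_valid_proteins : Prop := ∀ (sequences : List String), Dom_filter_valid_proteins sequences → Spec_filter_valid_proteins sequences (filter_valid_proteins sequences)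

-- ===== LEMMAS AND PROOFS =====

-- leading/trailing-strip of a character class empties a string iff every character is in the class
lemma stripChars_eq_nil_iff (s chars : List Char) :
    PySem.Chars.stripChars s chars = [] ↔ ∀ c ∈ s, chars.contains c = true := by
  unfold PySem.Chars.stripChars
  simp only [List.reverse_eq_nil_iff, List.dropWhile_eq_nil_iff, List.mem_reverse]
  constructor
  · intro h x hx
    by_cases hnil : List.dropWhile (fun c => chars.contains c) s = []
    · exact (List.dropWhile_eq_nil_iff.mp hnil) x hx
    · have hhead := List.head_dropWhile_not (p := fun c => chars.contains c) (l := s) hnil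
      have hmem := h _ (List.head_mem hnil)
      simp only [hmem] at hhead
      exact absurd hhead (by decide)
  · intro h x hx
    exact h x ((List.dropWhile_sublist _).mem hx)

-- the two per-sequence validity tests agree
lemma pred_eq (seq : String) :
    (PySem.Set.issubset (PySem.Set.ofList (PySem.Str.upper seq).toList)
        (PySem.Set.ofList AMINO_ACIDS.toList))
    = (PySem.Str.len (PySem.Str.stripChars (PySem.Str.upper seq) AMINO_ACIDS) == 0) := by
  rw [Bool.eq_iff_iff]
  rw [PySem.Set.issubset_iff]
  have hlen : (PySem.Str.len (PySem.Str.stripChars (PySem.Str.upper seq) AMINO_ACIDS) == 0) = true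
      ↔ PySem.Chars.stripChars (PySem.Str.upper seq).toList AMINO_ACIDS.toList = [] := by
    rw [PySem.Str.len_eq, PySem.Str.toList_stripChars]
    simp [List.length_eq_zero_iff]
  rw [hlen, stripChars_eq_nil_iff]
  constructor
  · intro h c hc
    have := h c (by rw [PySem.Set.mem_ofList]; exact hc)
    rw [PySem.Set.mem_ofList] at this
    simpa using this
  · intro h c hc
    rw [PySem.Set.mem_ofList] at hc
    rw [PySem.Set.mem_ofList]
    have := h c hc
    simpa using this

-- ===== VERDICT (by name: the statement is the Claim_ definition above) =====
theorem filter_valid_proteins_spec : Claim_equal_filter_valid_proteins := by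
  intro sequences _
  unfold Spec_filter_valid_proteins filter_valid_proteins filter_valid_proteins_alt
  rw [PySem.List.foldl_append_if_eq_filter
      (fun seq => PySem.Set.issubset (PySem.Set.ofList (PySem.Str.upper seq).toList)
        (PySem.Set.ofList AMINO_ACIDS.toList))]
  rw [List.nil_append]
  exact List.filter_congr (fun seq _ => pred_eq seq)
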